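-- pv_equiv track=rewrite | github.com/Yashrajrawani/ADA-lab-assignment | ada_labassignment_4.py | backtrack
-- ===== SOURCE A (Python) =====
-- crew = ['C1', 'C2']
--
-- def is_valid(schedule, crew_member, flight):
--     for f in schedule.get(crew_member, []):
--         # Check overlap
--         if not (flight[2] <= f[1] or flight[1] >= f[2]):
--             return False
--     return True
--
-- def backtrack(schedule, flights):
--     if not flights:
--         return schedule
--
--     flight = flights[0]
--
--     for c in crew:
--         if is_valid(schedule, c, flight):
--             schedule.setdefault(c, []).append(flight)
--
--             result = backtrack(schedule, flights[1:])
--             if result: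
--                 return result
--
--             schedule[c].pop()
--
--     return None
-- ===== SOURCE B (Python) =====
-- # Iterative DFS with an explicit stack of (crew, untried-crew, remaining-flights) frames,
-- # replacing the recursion; same C1-first order and the same in-place mutation of `schedule`.
-- crew = ['C1', 'C2']
--
-- def is_valid(schedule, crew_member, flight):
--     for f in schedule.get(crew_member, []):
--         if not (flight[2] <= f[1] or flight[1] >= f[2]):
--             return False
--     return True
--
-- def backtrack(schedule, flights):
--     stack = []
--     rest = flights
--     cands = list(crew)
--     while True:
--         if not rest:
--             return schedule
--         f = rest[0]
--         if not cands:
--             if not stack: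
--                 return None
--             c, cands, rest = stack.pop()
--             schedule[c].pop()
--             continue
--         c = cands[0]
--         if is_valid(schedule, c, f):
--             schedule.setdefault(c, []).append(f)
--             stack.append((c, cands[1:], rest))
--             rest = rest[1:]
--             cands = list(crew)
--         else:
--             cands = cands[1:]
-- ===== Notes on version B (the rewrite author's own statement) =====
-- stated objective: alternative
-- what changed: The recursive backtracking is rewritten as an iterative DFS driven by an explicit stack of (crew, untried-crew, remaining-flights) frames, with the same C1-first order and the same in-place append/pop mutation of the schedule.
import Mathlib
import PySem

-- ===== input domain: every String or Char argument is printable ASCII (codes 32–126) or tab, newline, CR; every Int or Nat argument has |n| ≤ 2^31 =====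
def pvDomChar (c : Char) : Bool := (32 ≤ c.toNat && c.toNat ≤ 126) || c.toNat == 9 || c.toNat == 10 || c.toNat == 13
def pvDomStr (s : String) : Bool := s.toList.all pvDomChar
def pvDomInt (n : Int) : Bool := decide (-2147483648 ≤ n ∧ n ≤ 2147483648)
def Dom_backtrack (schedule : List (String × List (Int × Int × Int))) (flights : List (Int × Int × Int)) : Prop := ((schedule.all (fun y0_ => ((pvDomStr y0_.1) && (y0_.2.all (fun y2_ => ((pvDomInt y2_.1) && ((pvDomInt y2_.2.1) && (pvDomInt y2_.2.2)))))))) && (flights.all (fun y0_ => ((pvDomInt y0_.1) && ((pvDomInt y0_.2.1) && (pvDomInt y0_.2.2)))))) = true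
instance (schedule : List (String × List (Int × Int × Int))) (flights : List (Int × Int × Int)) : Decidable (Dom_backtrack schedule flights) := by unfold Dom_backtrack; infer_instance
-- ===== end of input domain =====

-- B replaces A's recursion by an explicit iterative DFS over a stack of
-- (crew, untried-crew, remaining-flights) frames, with the same C1-first order.
-- Python A and B both mutate `schedule` in place (identically, operation for
-- operation); the equivalence proved here is about the RETURN value.

-- ===== PORT A =====
-- shared Python helper is_valid: the for-loop with early `return False`
def pvIsValidLoop (fl : Int × Int × Int) : List (Int × Int × Int) → Bool
  | [] => true
  | g :: gs => if !(fl.2.2 ≤ g.2.1 || fl.2.1 ≥ g.2.2) then false else pvIsValidLoop fl gs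
def pvIsValid (d : PySem.Dict String (List (Int × Int × Int))) (c : String)
    (fl : Int × Int × Int) : Bool :=
  pvIsValidLoop fl (d.getD c [])
def pvAppendF (d : PySem.Dict String (List (Int × Int × Int))) (c : String)
    (fl : Int × Int × Int) : PySem.Dict String (List (Int × Int × Int)) :=
  d.modify c [] (fun l => l ++ [fl])
def pvPopF (d : PySem.Dict String (List (Int × Int × Int))) (c : String) :
    PySem.Dict String (List (Int × Int × Int)) :=
  d.modify c [] (fun l => l.dropLast)
def pvTruthy (r : Option (PySem.Dict String (List (Int × Int × Int)))) : Bool :=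
  match r with
  | none => false
  | some d => !d.items.isEmpty

mutual
def pvBtA (s : PySem.Dict String (List (Int × Int × Int))) :
    List (Int × Int × Int) →
    Option (PySem.Dict String (List (Int × Int × Int))) × PySem.Dict String (List (Int × Int × Int))
  | [] => (some s, s)
  | f :: fs => pvTryA s ["C1", "C2"] f fs
  termination_by fs => (fs.length, 0)
def pvTryA (s : PySem.Dict String (List (Int × Int × Int))) :
    List String → (Int × Int × Int) → List (Int × Int × Int) →
    Option (PySem.Dict String (List (Int × Int × Int))) × PySem.Dict String (List (Int × Int × Int))
  | [], _, _ => (none, s)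
  | c :: cs, f, fs =>
    if pvIsValid s c f then
      let s1 := pvAppendF s c f
      let p := pvBtA s1 fs
      if pvTruthy p.1 then p else pvTryA (pvPopF p.2 c) cs f fs
    else pvTryA s cs f fs
  termination_by cs _ fs => (fs.length, cs.length + 1)
end


def backtrack (schedule : List (String × List (Int × Int × Int))) (flights : List (Int × Int × Int)) : Option (List (String × List (Int × Int × Int))) :=
  ((pvBtA (PySem.Dict.mk schedule) flights).1).map (fun d => d.items)

-- ===== PORT B =====
-- DFS machine: state = (schedule, remaining flights, untried crew for rest[0], frame stack);
-- pvPhi is the termination measure for the while-loop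
def pvPhi (rest : List (Int × Int × Int)) (cands : List String)
    (stack : List (String × List String × List (Int × Int × Int))) : Nat :=
  (cands.length + 1) * 4 ^ rest.length
    + (stack.map (fun fr => (fr.2.1.length + 1) * 4 ^ fr.2.2.length)).sum

def pvExecB (s : PySem.Dict String (List (Int × Int × Int)))
    (rest : List (Int × Int × Int)) (cands : List String)
    (stack : List (String × List String × List (Int × Int × Int))) :
    Option (PySem.Dict String (List (Int × Int × Int))) :=
  match rest with
  | [] => some s
  | f :: fs =>
    match cands with
    | [] =>
      match stack with
      | [] => none
      | (c, cands', rest') :: st => pvExecB (pvPopF s c) rest' cands' st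
    | c :: cs =>
      if pvIsValid s c f then
        pvExecB (pvAppendF s c f) fs ["C1", "C2"] ((c, cs, f :: fs) :: stack)
      else pvExecB s (f :: fs) cs stack
termination_by pvPhi rest cands stack
decreasing_by
  · unfold pvPhi
    simp only [List.map_cons, List.sum_cons, List.length_nil, List.length_cons]
    have h4 : 0 < 4 ^ (fs.length + 1) := Nat.pow_pos (by norm_num)
    omega
  · unfold pvPhi
    simp only [List.map_cons, List.sum_cons, List.length_cons, List.length_nil, pow_succ]
    have h4 : 0 < 4 ^ fs.length := Nat.pow_pos (by norm_num)
    generalize 4 ^ fs.length = x at *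
    generalize (List.map (fun fr => (fr.2.1.length + 1) * 4 ^ fr.2.2.length) stack).sum = S
    have h1 : (cs.length + 1 + 1) * (x * 4) = (cs.length + 1) * (x * 4) + x * 4 := by ring
    omega
  · unfold pvPhi
    simp only [List.length_cons]
    have h4 : 0 < 4 ^ (fs.length + 1) := Nat.pow_pos (by norm_num)
    have h1 : (cs.length + 1 + 1) * 4 ^ (fs.length + 1)
        = (cs.length + 1) * 4 ^ (fs.length + 1) + 4 ^ (fs.length + 1) := by ring
    omega


def backtrack_alt (schedule : List (String × List (Int × Int × Int))) (flights : List (Int × Int × Int)) : Option (List (String × List (Int × Int × Int))) :=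
  (pvExecB (PySem.Dict.mk schedule) flights ["C1", "C2"] []).map (fun d => d.items)

-- ===== PRECONDITION & SPEC =====
def Spec_backtrack (schedule : List (String × List (Int × Int × Int))) (flights : List (Int × Int × Int)) (out : Option (List (String × List (Int × Int × Int)))) : Prop := out = backtrack_alt schedule flights
instance (schedule : List (String × List (Int × Int × Int))) (flights : List (Int × Int × Int)) (out : Option (List (String × List (Int × Int × Int)))) : Decidable (Spec_backtrack schedule flights out) := by unfold Spec_backtrack; infer_instance

-- ===== CLAIM (what is proved, stated in full; the proofs are below) =====
def Claim_equal_backtrack : Prop := ∀ (schedule : List (String × List (Int × Int × Int))) (flights : List (Int × Int × Int)), Dom_backtrack schedule flights → Spec_backtrack schedule flights (backtrack schedule flights)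

-- ===== LEMMAS AND PROOFS =====

-- what B's machine does after a failure at the top of a frame stack
def pvUnwind (s : PySem.Dict String (List (Int × Int × Int)))
    (stack : List (String × List String × List (Int × Int × Int))) :
    Option (PySem.Dict String (List (Int × Int × Int))) :=
  match stack with
  | [] => none
  | (c, cands', rest') :: st => pvExecB (pvPopF s c) rest' cands' st

lemma pvContains_items_ne {d : PySem.Dict String (List (Int × Int × Int))} {k : String}
    (h : d.contains k = true) : d.items ≠ [] := by
  cases d with
  | mk items =>
    cases items with
    | nil => simp [PySem.Dict.contains] at h
    | cons a t => simp

lemma pvAppendF_ne (s : PySem.Dict String (List (Int × Int × Int))) (c : String)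
    (fl : Int × Int × Int) : (pvAppendF s c fl).items ≠ [] := by
  apply pvContains_items_ne (k := c)
  unfold pvAppendF
  simp [PySem.Dict.contains_modify]

lemma pvTryA_some_truthy (cs : List String) (f : Int × Int × Int) (fs : List (Int × Int × Int)) :
    ∀ (s : PySem.Dict String (List (Int × Int × Int))) r s',
      pvTryA s cs f fs = (some r, s') → pvTruthy (some r) = true := by
  induction cs with
  | nil => intro s r s' h; simp [pvTryA] at h
  | cons c cs ih =>
    intro s r s' h
    rw [pvTryA] at h
    by_cases hv : pvIsValid s c f = true
    · rw [if_pos hv] at h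
      by_cases ht : pvTruthy (pvBtA (pvAppendF s c f) fs).1 = true
      · rw [if_pos ht] at h
        have hr : (pvBtA (pvAppendF s c f) fs).1 = some r := by rw [h]
        rw [hr] at ht
        exact ht
      · rw [if_neg ht] at h
        exact ih _ _ _ h
    · rw [if_neg hv] at h
      exact ih _ _ _ h

lemma pvMain (t : List (Int × Int × Int)) :
    ∀ (f : Int × Int × Int) (cs : List String)
      (s : PySem.Dict String (List (Int × Int × Int)))
      (stack : List (String × List String × List (Int × Int × Int))),
      pvExecB s (f :: t) cs stack =
        (match pvTryA s cs f t with
         | (some r, _) => some r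
         | (none, s') => pvUnwind s' stack) := by
  induction t with
  | nil =>
    intro f cs
    induction cs with
    | nil =>
      intro s stack
      rw [pvTryA]
      cases stack with
      | nil => rw [pvExecB]; rfl
      | cons fr st =>
        cases fr with | mk c rest' => rw [pvExecB]; rfl
    | cons c cs ih =>
      intro s stack
      rw [pvExecB, pvTryA]
      by_cases hv : pvIsValid s c f = true
      · rw [if_pos hv, if_pos hv]
        have ht : pvTruthy (some (pvAppendF s c f)) = true := by
          simp [pvTruthy, pvAppendF_ne s c f]
        simp only [pvExecB, pvBtA]
        rw [if_pos ht]
      · rw [if_neg hv, if_neg hv]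
        exact ih s stack
  | cons f' t' ihT =>
    intro f cs
    induction cs with
    | nil =>
      intro s stack
      rw [pvTryA]
      cases stack with
      | nil => rw [pvExecB]; rfl
      | cons fr st =>
        cases fr with | mk c rest' => rw [pvExecB]; rfl
    | cons c cs ih =>
      intro s stack
      rw [pvExecB, pvTryA]
      by_cases hv : pvIsValid s c f = true
      · rw [if_pos hv, if_pos hv]
        rw [ihT f' ["C1", "C2"] (pvAppendF s c f) ((c, cs, f :: f' :: t') :: stack)]
        simp only [pvBtA]
        cases hq : pvTryA (pvAppendF s c f) ["C1", "C2"] f' t' with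
        | mk r1 s2 =>
          cases r1 with
          | some r =>
            have ht : pvTruthy (some r) = true := pvTryA_some_truthy _ _ _ _ _ _ hq
            rw [if_pos ht]
          | none =>
            rw [if_neg (by simp [pvTruthy])]
            show pvExecB (pvPopF s2 c) (f :: f' :: t') cs stack = _
            exact ih (pvPopF s2 c) stack
      · rw [if_neg hv, if_neg hv]
        exact ih s stack

lemma pvEquiv (schedule : List (String × List (Int × Int × Int)))
    (flights : List (Int × Int × Int)) :
    backtrack schedule flights = backtrack_alt schedule flights := by
  unfold backtrack backtrack_alt
  cases flights with
  | nil => simp only [pvBtA, pvExecB.eq_def]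
  | cons f t =>
    rw [pvMain t f ["C1", "C2"] (PySem.Dict.mk schedule) []]
    simp only [pvBtA]
    cases pvTryA (PySem.Dict.mk schedule) ["C1", "C2"] f t with
    | mk r s' =>
      cases r with
      | some r0 => rfl
      | none => rfl

-- ===== VERDICT (by name: the statement is the Claim_ definition above) =====
theorem backtrack_spec : Claim_equal_backtrack := by
  intro schedule flights _
  unfold Spec_backtrack
  exact pvEquiv schedule flights
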